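-- pv_equiv track=rewrite | github.com/iiAlter/wewrite | scripts/fix_format.py | fix_format
-- ===== SOURCE A (Python) =====
-- def fix_format(text: str) -> str:
--     lines = text.split("\n")
--     result = []
--     prev_blank = False
--     prev_h2 = False
--
--     for line in lines:
--         is_blank = not line.strip()
--         is_h2 = line.startswith("## ")
--
--         if is_blank:
--             # Only add blank line if previous was an H2 (H2 needs breathing room)
--             if prev_h2:
--                 if result and result[-1] != "":
--                     result.append("")
--                 prev_h2 = False
--                 prev_blank = True
--                 continue
--             # Skip multiple consecutive blanks
--             if prev_blank:
--                 continue
--             result.append("")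
--             prev_blank = True
--         else:
--             # Non-blank line
--             if prev_blank and not result[-1].startswith("## "):
--                 # Previous was blank, and we're not starting H2 -
--                 # check if this is continuation of previous paragraph
--                 # If previous non-blank line existed and wasn't H2, this blank was paragraph separator
--                 # which is wrong - skip it
--                 pass
--             result.append(line)
--             prev_blank = False
--             prev_h2 = is_h2
--
--     # Post-process: remove blank lines between H2 header and first paragraph
--     # and ensure exactly one blank before H2
--     lines = result
--     result = []
--     i = 0
--     while i < len(lines):
--         line = lines[i]
--         if line.startswith("## "):
--             # Remove any blank lines before this H2
--             while result and result[-1] == "":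
--                 result.pop()
--             # Ensure blank before H2 (if not at start)
--             if result and result[-1].strip():
--                 result.append("")
--             result.append(line)
--             # Skip blanks after H2 until first content
--             i += 1
--             while i < len(lines) and lines[i].strip() == "":
--                 i += 1
--             i -= 1  # back up one (the loop will advance)
--         else:
--             result.append(line)
--         i += 1
--
--     return "\n".join(result)
-- ===== SOURCE B (Python) =====
-- def fix_format(text: str) -> str:
--     out = []
--     suppress = False  # just emitted an H2: drop blank lines until content arrives
--     for line in text.split("\n"):
--         if line.startswith("## "):
--             while out and out[-1] == "":
--                 out.pop()
--             if out:
--                 out.append("")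
--             out.append(line)
--             suppress = True
--         elif not line.strip():
--             if not suppress and (not out or out[-1] != ""):
--                 out.append("")
--         else:
--             out.append(line)
--             suppress = False
--     return "\n".join(out)
-- ===== Notes on version B (the rewrite author's own statement) =====
-- stated objective: simpler
-- what changed: A's two sequential passes (first collapse consecutive blanks with prev_blank/prev_h2 flags, then an index-juggling post-process that pops blanks before H2 headers and skips blanks after them) are fused into one single pass over the lines with a boolean flag that drops blank lines immediately following an H2 header.
import Mathlib
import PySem

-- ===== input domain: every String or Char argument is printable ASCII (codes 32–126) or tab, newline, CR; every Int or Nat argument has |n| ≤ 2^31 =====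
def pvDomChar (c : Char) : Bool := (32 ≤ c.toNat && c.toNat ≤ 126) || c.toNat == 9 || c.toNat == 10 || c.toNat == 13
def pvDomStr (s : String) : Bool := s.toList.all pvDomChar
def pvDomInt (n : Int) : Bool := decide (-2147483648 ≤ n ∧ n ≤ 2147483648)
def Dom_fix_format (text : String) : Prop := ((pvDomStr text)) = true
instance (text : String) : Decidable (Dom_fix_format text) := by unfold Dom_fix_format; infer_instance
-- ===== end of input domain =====

-- B replaces A's two sequential passes (blank-collapsing pass, then an index-juggling H2 post-process)
-- by one single pass whose flag drops blank lines right after an H2 header; objective: simpler, same cost.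

-- line.strip() is falsy (blank line)
def pvBlank (l : String) : Bool := PySem.Str.strip l == ""
-- line.startswith("## ")
def pvH2 (l : String) : Bool := PySem.Str.startswith l "## "

-- ===== PORT A =====
-- First pass of A; the Python list `result` is held in REVERSE (result[-1] = head, append = cons).
def fixA1 : List String → Bool → Bool → List String → List String
  | acc, _, _, [] => acc.reverse
  | acc, pb, ph, l :: ls =>
    if pvBlank l then
      if ph then
        -- if result and result[-1] != "": result.append("")
        fixA1 (if !acc.isEmpty && acc.headD "" != "" then "" :: acc else acc) true false ls
      else if pb then fixA1 acc pb ph ls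
      else fixA1 ("" :: acc) true ph ls
    else
      -- (A's `if prev_blank and not result[-1].startswith("## "): pass` has no effect)
      fixA1 (l :: acc) false (pvH2 l) ls

-- while result and result[-1] == "": result.pop()   (on the reversed accumulator)
def popBlanksTop : List String → List String
  | [] => []
  | x :: xs => if x == "" then popBlanksTop xs else x :: xs

-- while i < len(lines) and lines[i].strip() == "": i += 1   (advance past blank lines)
def skipBlankLines : List String → List String
  | [] => []
  | x :: xs => if pvBlank x then skipBlankLines xs else x :: xs

theorem skipBlankLines_length_le (ls : List String) : (skipBlankLines ls).length ≤ ls.length := by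
  induction ls with
  | nil => simp [skipBlankLines]
  | cons x xs ih =>
    simp only [skipBlankLines]
    split
    · simp; omega
    · simp


-- Second pass of A (the while-i loop); `result` again held in reverse.
def fixA2 : List String → List String → List String
  | acc, [] => acc.reverse
  | acc, l :: ls =>
    if pvH2 l then
      let acc1 := popBlanksTop acc
      -- if result and result[-1].strip(): result.append("")
      let acc2 := if !acc1.isEmpty && !pvBlank (acc1.headD "") then "" :: acc1 else acc1
      fixA2 (l :: acc2) (skipBlankLines ls)
    else fixA2 (l :: acc) ls
  termination_by _ ls => ls.length
  decreasing_by
  · have := skipBlankLines_length_le ls; simp; omega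
  · simp

def fix_format (text : String) : String :=
  -- text.split("\n"); the separator is the non-empty literal "\n", so split? is always `some`
  PySem.Str.join "\n" (fixA2 [] (fixA1 [] false false ((PySem.Str.split? text "\n").getD [])))

-- ===== PORT B =====
-- Single pass of B with the drop-blanks-after-H2 flag `sup`; `out` held in reverse (out[-1] = head, append = cons, pop = tail).
def fixB : List String → Bool → List String → List String
  | acc, _, [] => acc.reverse
  | acc, sup, l :: ls =>
    if pvH2 l then
      let acc1 := popBlanksTop acc
      fixB (l :: (if acc1.isEmpty then acc1 else "" :: acc1)) true ls
    else if pvBlank l then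
      if !sup && (acc.isEmpty || acc.headD "" != "") then fixB ("" :: acc) sup ls
      else fixB acc sup ls
    else fixB (l :: acc) false ls

def fix_format_alt (text : String) : String :=
  PySem.Str.join "\n" (fixB [] false ((PySem.Str.split? text "\n").getD []))

-- ===== PRECONDITION & SPEC =====
def Spec_fix_format (text : String) (out : String) : Prop := out = fix_format_alt text
instance (text : String) (out : String) : Decidable (Spec_fix_format text out) := by unfold Spec_fix_format; infer_instance

-- ===== CLAIM (what is proved, stated in full; the proofs are below) =====
def Claim_equal_fix_format : Prop := ∀ (text : String), Dom_fix_format text → Spec_fix_format text (fix_format text)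

-- ===== LEMMAS AND PROOFS =====

-- A's first pass with the accumulator peeled off: the direct-style output it appends.
def A1s : Bool → Bool → List String → List String
  | _, _, [] => []
  | pb, ph, l :: ls =>
    if pvBlank l then
      if ph then "" :: A1s true false ls
      else if pb then A1s pb ph ls
      else "" :: A1s true ph ls
    else l :: A1s false (pvH2 l) ls

theorem pvBlank_empty : pvBlank "" = true := by decide

theorem pvH2_not_blank {l : String} (h : pvH2 l = true) : pvBlank l = false := by
  unfold pvH2 at h
  unfold pvBlank
  rw [PySem.Str.startswith_eq, PySem.Chars.startswith_iff] at h
  obtain ⟨t, ht⟩ := h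
  rw [beq_eq_false_iff_ne]
  intro he
  have h2 : (PySem.Str.strip l).toList = [] := by rw [he]; rfl
  rw [PySem.Str.toList_strip] at h2
  unfold PySem.Chars.strip PySem.Chars.rstrip PySem.Chars.lstrip at h2
  rw [List.reverse_eq_nil_iff, List.dropWhile_eq_nil_iff] at h2
  have hmem : ('#' : Char) ∈ List.dropWhile PySem.Chars.isspace l.toList := by
    rw [← ht]
    have hself : List.dropWhile PySem.Chars.isspace ("## ".toList ++ t) = "## ".toList ++ t := by
      rw [List.dropWhile_eq_self_iff]
      intro hne
      simp [PySem.Chars.isspace]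
    rw [hself]; simp
  have := h2 '#' (by simpa using hmem)
  simp [PySem.Chars.isspace] at this

theorem pvH2_ne_empty {l : String} (h : pvH2 l = true) : l ≠ "" := by
  intro he; subst he; exact absurd h (by decide)

theorem not_blank_ne_empty {l : String} (h : pvBlank l = false) : l ≠ "" := by
  intro he; subst he; rw [pvBlank_empty] at h; exact absurd h (by decide)

theorem fixA1_eq (ls : List String) : ∀ (acc : List String) (pb ph : Bool),
    (ph = true → acc ≠ [] ∧ acc.headD "" ≠ "") →
    fixA1 acc pb ph ls = acc.reverse ++ A1s pb ph ls := by
  induction ls with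
  | nil => intro acc pb ph _; simp [fixA1, A1s]
  | cons l ls ih =>
    intro acc pb ph hinv
    by_cases hb : pvBlank l = true
    · cases ph with
      | true =>
        obtain ⟨h1, h2⟩ := hinv rfl
        have hc : (!acc.isEmpty && acc.headD "" != "") = true := by
          simp only [Bool.and_eq_true, bne_iff_ne, Bool.not_eq_eq_eq_not, Bool.not_true,
            List.isEmpty_eq_false_iff]
          exact ⟨h1, h2⟩
        simp only [fixA1, A1s, hb, if_true, hc]
        rw [ih ("" :: acc) true false (by simp)]
        simp
      | false =>
        cases pb with
        | true => simp only [fixA1, A1s, hb, if_true]; exact ih _ _ _ (by simp)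
        | false =>
          simp only [fixA1, A1s, hb, if_true]
          rw [ih ("" :: acc) true false (by simp)]
          simp
    · simp only [Bool.not_eq_true] at hb
      simp only [fixA1, A1s, hb, Bool.false_eq_true, if_false]
      rw [ih _ _ _ ?_]
      · simp
      · intro hh2
        refine ⟨by simp, ?_⟩
        simpa using pvH2_ne_empty hh2

theorem skip_A1s_pb (ls : List String) :
    skipBlankLines (A1s true false ls) = A1s false false (skipBlankLines ls) := by
  induction ls with
  | nil => simp [A1s, skipBlankLines]
  | cons l ls ih =>
    by_cases hb : pvBlank l = true
    · simpa only [A1s, skipBlankLines, hb, if_true] using ih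
    · simp only [Bool.not_eq_true] at hb
      simp [A1s, skipBlankLines, hb]

theorem skip_A1s_ph (ls : List String) :
    skipBlankLines (A1s false true ls) = A1s false false (skipBlankLines ls) := by
  cases ls with
  | nil => simp [A1s, skipBlankLines]
  | cons l ls =>
    by_cases hb : pvBlank l = true
    · simp only [A1s, skipBlankLines, hb, if_true]
      simpa [skipBlankLines, pvBlank_empty] using skip_A1s_pb ls
    · simp only [Bool.not_eq_true] at hb
      simp [A1s, skipBlankLines, hb]

theorem fixB_skip (ls : List String) (acc : List String) :
    fixB acc true ls = fixB acc true (skipBlankLines ls) := by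
  induction ls generalizing acc with
  | nil => simp [skipBlankLines]
  | cons l ls ih =>
    by_cases hb : pvBlank l = true
    · have hh : pvH2 l = false := by
        by_contra hc
        simp only [Bool.not_eq_false] at hc
        rw [pvH2_not_blank hc] at hb
        exact absurd hb (by decide)
      simp only [fixB, skipBlankLines, hb, hh, Bool.false_eq_true, if_false, if_true,
        Bool.not_true, Bool.false_and]
      exact ih acc
    · simp only [Bool.not_eq_true] at hb
      simp [skipBlankLines, hb]

theorem popBlanksTop_mem {acc : List String} {x : String} (h : x ∈ popBlanksTop acc) : x ∈ acc := by
  induction acc with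
  | nil => simp [popBlanksTop] at h
  | cons y ys ih =>
    by_cases hy : (y == "") = true
    · simp only [popBlanksTop, hy, if_true] at h
      exact List.mem_cons_of_mem _ (ih h)
    · simp only [Bool.not_eq_true] at hy
      simpa only [popBlanksTop, hy, Bool.false_eq_true, if_false] using h

theorem popBlanksTop_head (acc : List String) :
    popBlanksTop acc = [] ∨ (popBlanksTop acc).headD "" ≠ "" := by
  induction acc with
  | nil => left; rfl
  | cons y ys ih =>
    by_cases hy : (y == "") = true
    · simp only [popBlanksTop, hy, if_true]; exact ih
    · simp only [Bool.not_eq_true] at hy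
      right
      simp only [popBlanksTop, hy, Bool.false_eq_true, if_false, List.headD_cons]
      simpa using hy

theorem skipBlankLines_head (ls : List String) :
    skipBlankLines ls = [] ∨ pvBlank ((skipBlankLines ls).headD "") = false := by
  induction ls with
  | nil => left; rfl
  | cons l ls ih =>
    by_cases hb : pvBlank l = true
    · simpa only [skipBlankLines, hb, if_true] using ih
    · simp only [Bool.not_eq_true] at hb
      right
      simp [skipBlankLines, hb]

theorem main_lemma : ∀ (n : Nat) (ls acc : List String) (pb sup : Bool),
    ls.length ≤ n →
    (∀ x ∈ acc, x ≠ "" → pvBlank x = false) →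
    (pb = true ↔ acc.head? = some "") →
    (sup = true → ls = [] ∨ pvBlank (ls.headD "") = false) →
    fixA2 acc (A1s pb false ls) = fixB acc sup ls := by
  intro n
  induction n with
  | zero =>
    intro ls acc pb sup hlen _ _ _
    rw [List.length_eq_zero_iff.mp (Nat.le_zero.mp hlen)]
    simp [A1s, fixA2, fixB]
  | succ n ih =>
    intro ls acc pb sup hlen hgood hpb hsup
    cases ls with
    | nil => simp [A1s, fixA2, fixB]
    | cons l ls =>
      by_cases hh : pvH2 l = true
      · have hb : pvBlank l = false := pvH2_not_blank hh
        simp only [A1s, hb, Bool.false_eq_true, if_false, hh, fixA2, fixB, if_true]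
        rw [skip_A1s_ph, fixB_skip]
        have hacc2 : (if !(popBlanksTop acc).isEmpty && !pvBlank ((popBlanksTop acc).headD "") then
              "" :: popBlanksTop acc else popBlanksTop acc) =
            (if (popBlanksTop acc).isEmpty then popBlanksTop acc else "" :: popBlanksTop acc) := by
          rcases popBlanksTop_head acc with hnil | hhd
          · simp [hnil]
          · have hne : popBlanksTop acc ≠ [] := by
              intro h0; rw [h0] at hhd; exact hhd rfl
            have hmem : (popBlanksTop acc).headD "" ∈ popBlanksTop acc := by
              cases h0 : popBlanksTop acc with
              | nil => exact absurd h0 hne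
              | cons a as => simp
            have hnb : pvBlank ((popBlanksTop acc).headD "") = false :=
              hgood _ (popBlanksTop_mem hmem) hhd
            rw [List.headD_eq_head?_getD] at hnb
            simp [List.isEmpty_eq_false_iff.mpr hne, hnb]
        rw [hacc2]
        refine ih (skipBlankLines ls) _ false true
          (le_trans (skipBlankLines_length_le ls) (by simpa using hlen)) ?_ ?_ ?_
        · intro x hx hxe
          rcases List.mem_cons.mp hx with h1 | h2
          · rw [h1]; exact hb
          · split at h2
            · exact hgood _ (popBlanksTop_mem h2) hxe
            · rcases List.mem_cons.mp h2 with h3 | h4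
              · exact absurd h3 hxe
              · exact hgood _ (popBlanksTop_mem h4) hxe
        · refine ⟨fun h0 => absurd h0 (by simp), fun hc => ?_⟩
          exact absurd (by simpa using hc) (not_blank_ne_empty hb)
        · intro _
          exact skipBlankLines_head ls
      · simp only [Bool.not_eq_true] at hh
        by_cases hb : pvBlank l = true
        · have hsupf : sup = false := by
            cases sup with
            | false => rfl
            | true =>
              rcases hsup rfl with h0 | h0
              · exact absurd h0 (by simp)
              · simp only [List.headD_cons] at h0; rw [hb] at h0; exact absurd h0 (by decide)
          subst hsupf
          cases pb with
          | true =>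
            obtain ⟨a, as, ha⟩ : ∃ a as, acc = a :: as := by
              cases acc with
              | nil => simp at hpb
              | cons a as => exact ⟨a, as, rfl⟩
            subst ha
            have ha0 : a = "" := by simpa using hpb.mp rfl
            subst ha0
            simp only [A1s, hb, if_true, fixB, hh, Bool.false_eq_true, if_false]
            have hcf : ((("" :: as).isEmpty || ("" :: as).headD "" != "")) = false := by simp
            rw [hcf]
            simp only [Bool.and_false, Bool.false_eq_true, if_false]
            exact ih ls ("" :: as) true false (by simpa using hlen) hgood hpb (by simp)
          | false =>
            have hcond : (acc.isEmpty || acc.headD "" != "") = true := by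
              cases acc with
              | nil => simp
              | cons a as =>
                simp only [List.isEmpty_cons, List.headD_cons, Bool.false_or, bne_iff_ne]
                intro h0
                rw [h0] at hpb
                simp at hpb
            simp only [A1s, hb, if_true, Bool.false_eq_true, if_false, fixA2, fixB, hh,
              Bool.not_false, Bool.true_and, hcond]
            have hh0 : pvH2 "" = false := by decide
            simp only [hh0, Bool.false_eq_true, if_false]
            refine ih ls ("" :: acc) true false (by simpa using hlen) ?_ (by simp) (by simp)
            intro x hx hxe
            rcases List.mem_cons.mp hx with h1 | h2
            · exact absurd h1 hxe
            · exact hgood _ h2 hxe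
        · simp only [Bool.not_eq_true] at hb
          simp only [A1s, hb, Bool.false_eq_true, if_false, hh, fixA2, fixB]
          refine ih ls (l :: acc) false false (by simpa using hlen) ?_ ?_ (by simp)
          · intro x hx hxe
            rcases List.mem_cons.mp hx with h1 | h2
            · rw [h1]; exact hb
            · exact hgood _ h2 hxe
          · refine ⟨fun h0 => absurd h0 (by simp), fun hc => ?_⟩
            exact absurd (by simpa using hc) (not_blank_ne_empty hb)

-- ===== VERDICT (by name: the statement is the Claim_ definition above) =====
theorem fix_format_spec : Claim_equal_fix_format := by
  intro text _
  unfold Spec_fix_format fix_format fix_format_alt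
  congr 1
  rw [fixA1_eq _ [] false false (by simp)]
  simp only [List.reverse_nil, List.nil_append]
  exact main_lemma _ _ [] false false le_rfl (by simp) (by simp) (by simp)
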